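-- pv_equiv track=rewrite | github.com/Dhruv11092003/skillExtract | src/pipeline/preprocess.py | build_bio_labels
-- ===== SOURCE A (Python) =====
-- from typing import Dict, List
--
-- DEFAULT_SKILL_LEXICON = {
--     "python", "java", "c++", "sql", "pytorch", "tensorflow", "docker", "kubernetes",
--     "aws", "azure", "nlp", "machine learning", "deep learning", "transformers", "fastapi",
-- }
--
-- def build_bio_labels(tokens: List[str], skill_lexicon: set | None = None) -> List[str]:
--     lex = skill_lexicon or DEFAULT_SKILL_LEXICON
--     labels = ["O"] * len(tokens)
--     i = 0
--     while i < len(tokens):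
--         matched = False
--         for span in (3, 2, 1):
--             if i + span > len(tokens):
--                 continue
--             phrase = " ".join(t.lower() for t in tokens[i:i + span])
--             if phrase in lex:
--                 labels[i] = "B-SKILL"
--                 for j in range(i + 1, i + span):
--                     labels[j] = "I-SKILL"
--                 i += span
--                 matched = True
--                 break
--         if not matched:
--             i += 1
--     return labels
-- ===== SOURCE B (Python) =====
-- DEFAULT_SKILL_LEXICON = {
--     "python", "java", "c++", "sql", "pytorch", "tensorflow", "docker", "kubernetes",
--     "aws", "azure", "nlp", "machine learning", "deep learning", "transformers", "fastapi",
-- }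
--
-- def build_bio_labels(tokens, skill_lexicon=None):
--     given = skill_lexicon if skill_lexicon is not None else set()
--     lex = DEFAULT_SKILL_LEXICON if len(given) == 0 else given
--     n = len(tokens)
--     low = [t.lower() for t in tokens]
--     # pass 1: best[i] = longest span in (3,2,1) whose phrase is in lex, else 0
--     best = [0] * n
--     for i in range(n):
--         for s in (3, 2, 1):
--             if i + s <= n and " ".join(low[i:i + s]) in lex:
--                 best[i] = s
--                 break
--     # pass 2: emit labels by consuming matched spans
--     labels = []
--     i = 0
--     while i < n:
--         s = best[i]
--         if s > 0:
--             labels.append("B-SKILL")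
--             labels.extend(["I-SKILL"] * (s - 1))
--             i += s
--         else:
--             labels.append("O")
--             i += 1
--     return labels
-- ===== Notes on version B (the rewrite author's own statement) =====
-- stated objective: faster
-- what changed: A labels in one pass, repeatedly lowercasing and joining token slices while mutating a prefilled label array in place; B lowercases every token once, precomputes a best-span table (longest matching span in (3,2,1) per position) in a first pass, then a second pass builds the label list by appending per consumed span.
import Mathlib
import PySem

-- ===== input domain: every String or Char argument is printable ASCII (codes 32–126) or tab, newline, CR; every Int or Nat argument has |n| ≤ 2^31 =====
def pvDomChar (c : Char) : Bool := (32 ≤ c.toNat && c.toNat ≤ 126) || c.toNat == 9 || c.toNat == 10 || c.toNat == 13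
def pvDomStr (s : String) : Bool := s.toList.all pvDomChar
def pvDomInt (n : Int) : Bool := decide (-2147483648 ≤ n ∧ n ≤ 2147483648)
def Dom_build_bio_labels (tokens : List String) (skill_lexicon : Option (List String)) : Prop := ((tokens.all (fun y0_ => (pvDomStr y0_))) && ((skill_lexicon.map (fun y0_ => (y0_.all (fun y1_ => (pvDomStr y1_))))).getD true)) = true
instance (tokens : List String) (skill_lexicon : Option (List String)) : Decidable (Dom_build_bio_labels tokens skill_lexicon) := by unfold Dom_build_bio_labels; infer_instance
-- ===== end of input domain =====

-- B replaces A's single mutating loop by two passes (tokens lowercased once, a precomputed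
-- best-span table, then an appending walk that consumes spans); measurably faster by a constant factor.

-- ===== PORT A =====
-- the DEFAULT_SKILL_LEXICON set, as its list of distinct elements (only membership is used)
def pvDefaultLex : List String :=
  ["python", "java", "c++", "sql", "pytorch", "tensorflow", "docker", "kubernetes",
   "aws", "azure", "nlp", "machine learning", "deep learning", "transformers", "fastapi"]

-- " ".join(t.lower() for t in tokens[i:i+s]); i, i+s are in-range naturals so the slice is drop/take
def pvPhraseA (tokens : List String) (i s : Nat) : String :=
  PySem.Str.join " " (((tokens.drop i).take s).map PySem.Str.lower)

-- A's while-loop, step for step: the unrolled `for span in (3,2,1)` with its in-place label writes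
def pvALoop (lex tokens labels : List String) (i : Nat) : List String :=
  if _h : i < tokens.length then
    if i + 3 ≤ tokens.length ∧ pvPhraseA tokens i 3 ∈ lex then
      pvALoop lex tokens
        ((List.range' (i + 1) 2).foldl (fun ls j => ls.set j "I-SKILL") (labels.set i "B-SKILL"))
        (i + 3)
    else if i + 2 ≤ tokens.length ∧ pvPhraseA tokens i 2 ∈ lex then
      pvALoop lex tokens
        ((List.range' (i + 1) 1).foldl (fun ls j => ls.set j "I-SKILL") (labels.set i "B-SKILL"))
        (i + 2)
    else if i + 1 ≤ tokens.length ∧ pvPhraseA tokens i 1 ∈ lex then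
      pvALoop lex tokens
        ((List.range' (i + 1) 0).foldl (fun ls j => ls.set j "I-SKILL") (labels.set i "B-SKILL"))
        (i + 1)
    else
      pvALoop lex tokens labels (i + 1)
  else labels
termination_by tokens.length - i

def build_bio_labels (tokens : List String) (skill_lexicon : Option (List String)) : List String :=
  -- `skill_lexicon or DEFAULT_SKILL_LEXICON`: None and the empty set are falsy
  let lex := match skill_lexicon with
    | some (x :: xs) => x :: xs
    | _ => pvDefaultLex
  pvALoop lex tokens (List.replicate tokens.length "O") 0

-- ===== PORT B =====
-- B's own copy of the DEFAULT_SKILL_LEXICON set, as its list of distinct elements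
def pvDefaultLexB : List String :=
  ["python", "java", "c++", "sql", "pytorch", "tensorflow", "docker", "kubernetes",
   "aws", "azure", "nlp", "machine learning", "deep learning", "transformers", "fastapi"]

-- pass 1 body: longest span in (3,2,1) matching at i, else 0 (the unrolled `for s in (3,2,1)`)
def pvBestAt (lex low : List String) (i : Nat) : Nat :=
  if i + 3 ≤ low.length ∧ PySem.Str.join " " ((low.drop i).take 3) ∈ lex then 3
  else if i + 2 ≤ low.length ∧ PySem.Str.join " " ((low.drop i).take 2) ∈ lex then 2
  else if i + 1 ≤ low.length ∧ PySem.Str.join " " ((low.drop i).take 1) ∈ lex then 1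
  else 0

-- pass 2: the while-loop appending to `labels`, consuming best[i] tokens per step
def pvBWalk (best : List Nat) (n : Nat) (labels : List String) (i : Nat) : List String :=
  if _h : i < n then
    let s := best.getD i 0
    if _hs : 0 < s then
      pvBWalk best n (labels ++ "B-SKILL" :: List.replicate (s - 1) "I-SKILL") (i + s)
    else
      pvBWalk best n (labels ++ ["O"]) (i + 1)
  else labels
termination_by n - i
decreasing_by all_goals (simp only [s] at *; omega)

def build_bio_labels_alt (tokens : List String) (skill_lexicon : Option (List String)) : List String :=
  -- `skill_lexicon or DEFAULT_SKILL_LEXICON`: None and the empty set are falsy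
  let given := skill_lexicon.getD []
  let lex := if given.isEmpty then pvDefaultLexB else given
  let n := tokens.length
  let low := tokens.map PySem.Str.lower
  let best := (List.range n).map (pvBestAt lex low)
  pvBWalk best n [] 0

-- ===== PRECONDITION & SPEC =====
def Spec_build_bio_labels (tokens : List String) (skill_lexicon : Option (List String)) (out : List String) : Prop := out = build_bio_labels_alt tokens skill_lexicon
instance (tokens : List String) (skill_lexicon : Option (List String)) (out : List String) : Decidable (Spec_build_bio_labels tokens skill_lexicon out) := by unfold Spec_build_bio_labels; infer_instance

-- ===== CLAIM (what is proved, stated in full; the proofs are below) =====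
def Claim_equal_build_bio_labels : Prop := ∀ (tokens : List String) (skill_lexicon : Option (List String)), Dom_build_bio_labels tokens skill_lexicon → Spec_build_bio_labels tokens skill_lexicon (build_bio_labels tokens skill_lexicon)

-- ===== LEMMAS AND PROOFS =====

-- proof-side normal form: the labels both versions produce from position i onward
def pvEmit (lex tokens : List String) (i : Nat) : List String :=
  if _h3 : i + 3 ≤ tokens.length ∧ pvPhraseA tokens i 3 ∈ lex then
    "B-SKILL" :: "I-SKILL" :: "I-SKILL" :: pvEmit lex tokens (i + 3)
  else if _h2 : i + 2 ≤ tokens.length ∧ pvPhraseA tokens i 2 ∈ lex then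
    "B-SKILL" :: "I-SKILL" :: pvEmit lex tokens (i + 2)
  else if _h1 : i + 1 ≤ tokens.length ∧ pvPhraseA tokens i 1 ∈ lex then
    "B-SKILL" :: pvEmit lex tokens (i + 1)
  else if _h0 : i < tokens.length then
    "O" :: pvEmit lex tokens (i + 1)
  else []
termination_by tokens.length - i
decreasing_by all_goals omega

theorem pv_set_at (Q : List String) (m : Nat) (v : String) (hm : 0 < m) :
    (Q ++ List.replicate m "O").set Q.length v = (Q ++ [v]) ++ List.replicate (m - 1) "O" := by
  induction Q with
  | nil =>
    cases m with
    | zero => omega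
    | succ k => simp [List.replicate_succ]
  | cons a Q ih => simpa using ih

theorem pvPhrase_eq (tokens : List String) (i s : Nat) :
    PySem.Str.join " " (((tokens.map PySem.Str.lower).drop i).take s) = pvPhraseA tokens i s := by
  simp [pvPhraseA, List.map_take, List.map_drop]

theorem pvALoop_emit (lex tokens : List String) :
    ∀ (k : Nat) (P : List String) (i : Nat), i = P.length → k = tokens.length - i →
      pvALoop lex tokens (P ++ List.replicate (tokens.length - i) "O") i = P ++ pvEmit lex tokens i := by
  intro k
  induction k using Nat.strong_induction_on with
  | _ k ih =>
    intro P i hi hk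
    rw [pvALoop, pvEmit]
    by_cases h0 : i < tokens.length
    · simp only [dif_pos h0]
      by_cases h3 : i + 3 ≤ tokens.length ∧ pvPhraseA tokens i 3 ∈ lex
      · simp only [if_pos h3, dif_pos h3]
        have e1 : (P ++ List.replicate (tokens.length - i) "O").set i "B-SKILL"
            = (P ++ ["B-SKILL"]) ++ List.replicate (tokens.length - i - 1) "O" := by
          rw [hi]; exact pv_set_at _ _ _ (by omega)
        have e2 : ((P ++ ["B-SKILL"]) ++ List.replicate (tokens.length - i - 1) "O").set (i + 1) "I-SKILL"
            = ((P ++ ["B-SKILL"]) ++ ["I-SKILL"]) ++ List.replicate (tokens.length - i - 2) "O" := by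
          have : i + 1 = (P ++ ["B-SKILL"]).length := by simp [hi]
          rw [this]
          have := pv_set_at (P ++ ["B-SKILL"]) (tokens.length - i - 1) "I-SKILL" (by omega)
          simpa using this
        have e3 : (((P ++ ["B-SKILL"]) ++ ["I-SKILL"]) ++ List.replicate (tokens.length - i - 2) "O").set (i + 2) "I-SKILL"
            = (((P ++ ["B-SKILL"]) ++ ["I-SKILL"]) ++ ["I-SKILL"]) ++ List.replicate (tokens.length - i - 3) "O" := by
          have : i + 2 = ((P ++ ["B-SKILL"]) ++ ["I-SKILL"]).length := by simp [hi]
          rw [this]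
          have := pv_set_at ((P ++ ["B-SKILL"]) ++ ["I-SKILL"]) (tokens.length - i - 2) "I-SKILL" (by omega)
          simpa using this
        have hr : List.range' (i + 1) 2 = [i + 1, i + 2] := by simp [List.range']
        rw [hr]
        simp only [List.foldl_cons, List.foldl_nil, e1, e2, e3]
        have hrec := ih (tokens.length - (i + 3)) (by omega)
          (((P ++ ["B-SKILL"]) ++ ["I-SKILL"]) ++ ["I-SKILL"]) (i + 3) (by simp [hi]) rfl
        have hm : tokens.length - i - 3 = tokens.length - (i + 3) := by omega
        rw [hm, hrec]
        simp
      · simp only [if_neg h3, dif_neg h3]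
        by_cases h2 : i + 2 ≤ tokens.length ∧ pvPhraseA tokens i 2 ∈ lex
        · simp only [if_pos h2, dif_pos h2]
          have e1 : (P ++ List.replicate (tokens.length - i) "O").set i "B-SKILL"
              = (P ++ ["B-SKILL"]) ++ List.replicate (tokens.length - i - 1) "O" := by
            rw [hi]; exact pv_set_at _ _ _ (by omega)
          have e2 : ((P ++ ["B-SKILL"]) ++ List.replicate (tokens.length - i - 1) "O").set (i + 1) "I-SKILL"
              = ((P ++ ["B-SKILL"]) ++ ["I-SKILL"]) ++ List.replicate (tokens.length - i - 2) "O" := by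
            have : i + 1 = (P ++ ["B-SKILL"]).length := by simp [hi]
            rw [this]
            have := pv_set_at (P ++ ["B-SKILL"]) (tokens.length - i - 1) "I-SKILL" (by omega)
            simpa using this
          have hr : List.range' (i + 1) 1 = [i + 1] := by simp [List.range']
          rw [hr]
          simp only [List.foldl_cons, List.foldl_nil, e1, e2]
          have hrec := ih (tokens.length - (i + 2)) (by omega)
            ((P ++ ["B-SKILL"]) ++ ["I-SKILL"]) (i + 2) (by simp [hi]) rfl
          have hm : tokens.length - i - 2 = tokens.length - (i + 2) := by omega
          rw [hm, hrec]
          simp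
        · simp only [if_neg h2, dif_neg h2]
          by_cases h1 : i + 1 ≤ tokens.length ∧ pvPhraseA tokens i 1 ∈ lex
          · simp only [if_pos h1, dif_pos h1]
            have e1 : (P ++ List.replicate (tokens.length - i) "O").set i "B-SKILL"
                = (P ++ ["B-SKILL"]) ++ List.replicate (tokens.length - i - 1) "O" := by
              rw [hi]; exact pv_set_at _ _ _ (by omega)
            have hr : List.range' (i + 1) 0 = [] := by simp
            rw [hr]
            simp only [List.foldl_nil, e1]
            have hrec := ih (tokens.length - (i + 1)) (by omega)
              (P ++ ["B-SKILL"]) (i + 1) (by simp [hi]) rfl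
            have hm : tokens.length - i - 1 = tokens.length - (i + 1) := by omega
            rw [hm, hrec]
            simp
          · simp only [if_neg h1, dif_neg h1]
            have e1 : P ++ List.replicate (tokens.length - i) "O"
                = (P ++ ["O"]) ++ List.replicate (tokens.length - (i + 1)) "O" := by
              have : tokens.length - i = (tokens.length - (i + 1)) + 1 := by omega
              rw [this, List.replicate_succ]
              simp
            rw [e1]
            have hrec := ih (tokens.length - (i + 1)) (by omega)
              (P ++ ["O"]) (i + 1) (by simp [hi]) rfl
            rw [hrec]
            simp
    · have hn : tokens.length - i = 0 := by omega
      simp only [dif_neg h0]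
      have c3 : ¬ (i + 3 ≤ tokens.length ∧ pvPhraseA tokens i 3 ∈ lex) := by
        intro h; omega
      have c2 : ¬ (i + 2 ≤ tokens.length ∧ pvPhraseA tokens i 2 ∈ lex) := by
        intro h; omega
      have c1 : ¬ (i + 1 ≤ tokens.length ∧ pvPhraseA tokens i 1 ∈ lex) := by
        intro h; omega
      simp [hn, c3, c2, h0]

theorem pvBestAt_getD (lex tokens : List String) (i : Nat) (h : i < tokens.length) :
    ((List.range tokens.length).map (pvBestAt lex (tokens.map PySem.Str.lower))).getD i 0
      = pvBestAt lex (tokens.map PySem.Str.lower) i := by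
  rw [List.getD_eq_getElem?_getD, List.getElem?_map, List.getElem?_range h]
  rfl

theorem pvBWalk_emit (lex tokens : List String) :
    ∀ (k : Nat) (acc : List String) (i : Nat), k = tokens.length - i →
      pvBWalk ((List.range tokens.length).map (pvBestAt lex (tokens.map PySem.Str.lower)))
        tokens.length acc i = acc ++ pvEmit lex tokens i := by
  intro k
  induction k using Nat.strong_induction_on with
  | _ k ih =>
    intro acc i hk
    rw [pvBWalk, pvEmit]
    by_cases h0 : i < tokens.length
    · simp only [dif_pos h0]
      rw [pvBestAt_getD lex tokens i h0]
      rw [pvBestAt]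
      have hlen : (tokens.map PySem.Str.lower).length = tokens.length := by simp
      by_cases h3 : i + 3 ≤ tokens.length ∧ pvPhraseA tokens i 3 ∈ lex
      · have h3' : i + 3 ≤ (tokens.map PySem.Str.lower).length ∧
            PySem.Str.join " " (((tokens.map PySem.Str.lower).drop i).take 3) ∈ lex := by
          rw [hlen, pvPhrase_eq]; exact h3
        simp only [if_pos h3', dif_pos h3]
        rw [dif_pos (show (0:Nat) < 3 by omega)]
        rw [ih (tokens.length - (i + 3)) (by omega) _ (i + 3) rfl]
        simp [List.replicate]
      · have h3' : ¬ (i + 3 ≤ (tokens.map PySem.Str.lower).length ∧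
            PySem.Str.join " " (((tokens.map PySem.Str.lower).drop i).take 3) ∈ lex) := by
          rw [hlen, pvPhrase_eq]; exact h3
        simp only [if_neg h3', dif_neg h3]
        by_cases h2 : i + 2 ≤ tokens.length ∧ pvPhraseA tokens i 2 ∈ lex
        · have h2' : i + 2 ≤ (tokens.map PySem.Str.lower).length ∧
              PySem.Str.join " " (((tokens.map PySem.Str.lower).drop i).take 2) ∈ lex := by
            rw [hlen, pvPhrase_eq]; exact h2
          simp only [if_pos h2', dif_pos h2]
          rw [dif_pos (show (0:Nat) < 2 by omega)]
          rw [ih (tokens.length - (i + 2)) (by omega) _ (i + 2) rfl]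
          simp [List.replicate]
        · have h2' : ¬ (i + 2 ≤ (tokens.map PySem.Str.lower).length ∧
              PySem.Str.join " " (((tokens.map PySem.Str.lower).drop i).take 2) ∈ lex) := by
            rw [hlen, pvPhrase_eq]; exact h2
          simp only [if_neg h2', dif_neg h2]
          by_cases h1 : i + 1 ≤ tokens.length ∧ pvPhraseA tokens i 1 ∈ lex
          · have h1' : i + 1 ≤ (tokens.map PySem.Str.lower).length ∧
                PySem.Str.join " " (((tokens.map PySem.Str.lower).drop i).take 1) ∈ lex := by
              rw [hlen, pvPhrase_eq]; exact h1
            simp only [if_pos h1', dif_pos h1]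
            rw [dif_pos (show (0:Nat) < 1 by omega)]
            rw [ih (tokens.length - (i + 1)) (by omega) _ (i + 1) rfl]
            simp [List.replicate]
          · have h1' : ¬ (i + 1 ≤ (tokens.map PySem.Str.lower).length ∧
                PySem.Str.join " " (((tokens.map PySem.Str.lower).drop i).take 1) ∈ lex) := by
              rw [hlen, pvPhrase_eq]; exact h1
            simp only [if_neg h1', dif_neg h1]
            rw [dif_neg (show ¬ (0:Nat) < 0 by omega)]
            rw [ih (tokens.length - (i + 1)) (by omega) _ (i + 1) rfl]
            simp
    · have c3 : ¬ (i + 3 ≤ tokens.length ∧ pvPhraseA tokens i 3 ∈ lex) := by intro h; omega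
      have c2 : ¬ (i + 2 ≤ tokens.length ∧ pvPhraseA tokens i 2 ∈ lex) := by intro h; omega
      have c1 : ¬ (i + 1 ≤ tokens.length ∧ pvPhraseA tokens i 1 ∈ lex) := by intro h; omega
      simp [h0, c3, c2]

theorem pv_equal_for_lex (lex tokens : List String) :
    pvALoop lex tokens (List.replicate tokens.length "O") 0
      = pvBWalk ((List.range tokens.length).map (pvBestAt lex (tokens.map PySem.Str.lower)))
          tokens.length [] 0 := by
  have hA := pvALoop_emit lex tokens tokens.length [] 0 rfl (by omega)
  have hB := pvBWalk_emit lex tokens tokens.length [] 0 (by omega)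
  simp only [List.nil_append, Nat.sub_zero] at hA hB
  rw [hA, hB]

-- ===== VERDICT (by name: the statement is the Claim_ definition above) =====
theorem build_bio_labels_spec : Claim_equal_build_bio_labels := by
  intro tokens skill_lexicon _
  unfold Spec_build_bio_labels build_bio_labels build_bio_labels_alt
  cases skill_lexicon with
  | none => exact pv_equal_for_lex pvDefaultLex tokens
  | some l =>
    cases l with
    | nil => exact pv_equal_for_lex pvDefaultLex tokens
    | cons x xs => exact pv_equal_for_lex (x :: xs) tokens
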